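-- pv_equiv track=rewrite | github.com/cagarwal27/agarwal-2026-studies | 18_poly_bridge/poly_bridge_scaling.py | build_terms
-- ===== SOURCE A (Python) =====
-- def build_terms(p):
--     """
--     Build ordered list of (i, j) for all monomials x^i * y^j with i+j <= p.
--     Returns: terms list, M = len(terms) = (p+1)(p+2)/2
--     """
--     terms = []
--     for total in range(p + 1):
--         for i in range(total + 1):
--             j = total - i
--             terms.append((i, j))
--     M = len(terms)
--     assert M == (p + 1) * (p + 2) // 2, f"Expected {(p+1)*(p+2)//2} terms, got {M}"
--     return terms, M
-- ===== SOURCE B (Python) =====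
-- def build_terms(p):
--     """
--     Build ordered list of (i, j) for all monomials x^i * y^j with i+j <= p.
--     Single state-machine walk: starting at (0, 0), emit the current pair and
--     step to the next pair in graded order (j == 0 ends a diagonal, so restart
--     at (0, i + 1); otherwise move along the diagonal to (i + 1, j - 1)),
--     stopping once the total degree exceeds p.
--     Returns: terms list, M = len(terms)
--     """
--     terms = []
--     i, j = 0, 0
--     while i + j <= p:
--         terms.append((i, j))
--         if j == 0:
--             i, j = 0, i + 1
--         else:
--             i, j = i + 1, j - 1
--     return terms, len(terms)
-- ===== Notes on version B (the rewrite author's own statement) =====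
-- stated objective: alternative
-- what changed: B replaces A's nested range loops with a single state-machine walk that steps from each pair to its graded-order successor ((0,i+1) at the end of a diagonal, else (i+1,j-1)) until the total degree exceeds p; A's assert is dropped, so B returns ([], 0) where A's assert fires (p <= -3).
-- outside the precondition, e.g. on build_terms(-3): A raises AssertionError, B returns ([], 0)
import Mathlib
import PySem

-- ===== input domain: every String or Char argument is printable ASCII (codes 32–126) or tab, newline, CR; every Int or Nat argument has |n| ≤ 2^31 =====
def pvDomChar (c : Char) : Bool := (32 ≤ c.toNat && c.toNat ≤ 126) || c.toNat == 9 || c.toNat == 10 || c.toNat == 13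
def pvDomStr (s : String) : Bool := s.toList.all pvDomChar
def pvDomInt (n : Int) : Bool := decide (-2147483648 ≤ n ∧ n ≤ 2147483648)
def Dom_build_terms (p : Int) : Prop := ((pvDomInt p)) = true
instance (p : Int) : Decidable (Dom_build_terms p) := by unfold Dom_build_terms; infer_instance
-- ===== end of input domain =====

-- B replaces A's nested diagonal loops with a single state-machine walk stepping
-- from each pair to its graded-order successor; alternative decomposition, same cost.

-- ===== PORT A =====
-- A's assert only fails for p ≤ -3 (outside Pre_); on Pre_ it always passes, so the
-- transliteration carries no assert.
def build_terms (p : Int) : (List (Int × Int)) × Int :=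
  let terms : List (Int × Int) :=
    (PySem.List.pyRange 0 (p + 1) 1).foldl (fun terms total =>
      (PySem.List.pyRange 0 (total + 1) 1).foldl (fun terms i =>
        terms ++ [(i, total - i)]) terms) []
  (terms, terms.length)

-- ===== PORT B =====
-- B's while loop, ported with a fuel counter as the totality device; the fuel chosen
-- in build_terms_alt is a strict upper bound on the number of iterations (proved below),
-- so the zero-fuel branch is never reached.
def build_terms_walk : Nat → Int → Int → Int → List (Int × Int) → List (Int × Int)
  | 0, _, _, _, acc => acc
  | Nat.succ n, p, i, j, acc =>
    if i + j ≤ p then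
      if j == 0 then build_terms_walk n p 0 (i + 1) (acc ++ [(i, j)])
      else build_terms_walk n p (i + 1) (j - 1) (acc ++ [(i, j)])
    else acc

def build_terms_alt (p : Int) : (List (Int × Int)) × Int :=
  let terms := build_terms_walk (((p + 1) * (p + 2)).toNat + 1) p 0 0 []
  (terms, terms.length)

-- ===== PRECONDITION & SPEC =====
-- Pre_ excludes exactly p ≤ -3, where A's assert raises AssertionError ((p+1)(p+2)//2 > 0
-- while the loops build no terms); A returns normally on every p ≥ -2 (B returns ([], 0)
-- on the excluded inputs).
def Pre_build_terms (p : Int) : Prop := -2 ≤ p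
instance (p : Int) : Decidable (Pre_build_terms p) := by unfold Pre_build_terms; infer_instance
def pvWitness_build_terms : Int := 3

def Spec_build_terms (p : Int) (out : (List (Int × Int)) × Int) : Prop := out = build_terms_alt p
instance (p : Int) (out : (List (Int × Int)) × Int) : Decidable (Spec_build_terms p out) := by unfold Spec_build_terms; infer_instance

-- ===== CLAIM (what is proved, stated in full; the proofs are below) =====
def Claim_equal_build_terms : Prop := ∀ (p : Int), Dom_build_terms p → Pre_build_terms p → Spec_build_terms p (build_terms p)

-- ===== LEMMAS AND PROOFS =====

-- the diagonal of total degree `total`, and A's list = all diagonals 0..p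
def pvDiag (total : Int) : List (Int × Int) :=
  (PySem.List.pyRange 0 (total + 1) 1).map (fun i => (i, total - i))

def pvTail (p t : Int) : List (Int × Int) :=
  (PySem.List.pyRange t (p + 1) 1).flatMap pvDiag

-- A's nested append loops are the flatMap of the per-degree diagonals.
lemma build_terms_eq (p : Int) :
    build_terms p = (pvTail p 0, ((pvTail p 0).length : Int)) := by
  have h : (PySem.List.pyRange 0 (p + 1) 1).foldl (fun terms total =>
      (PySem.List.pyRange 0 (total + 1) 1).foldl (fun terms i =>
        terms ++ [(i, total - i)]) terms) [] = pvTail p 0 := by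
    unfold pvTail pvDiag
    rw [PySem.List.foldl_congr_mem (PySem.List.pyRange 0 (p + 1) 1)
        (fun terms total => (PySem.List.pyRange 0 (total + 1) 1).foldl
          (fun terms i => terms ++ [(i, total - i)]) terms)
        (fun acc total => acc ++ (PySem.List.pyRange 0 (total + 1) 1).map (fun i => (i, total - i)))
        []
        (by intro acc x _; simp only [PySem.List.foldl_append_singleton_eq_map]),
      PySem.List.foldl_append_eq_flatMap]
    simp
  simp only [build_terms, h]

-- one-step unfolding of the walk (rfl; keeps simp from unfolding repeatedly)
lemma walk_succ (n : Nat) (p i j : Int) (acc : List (Int × Int)) :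
    build_terms_walk (n + 1) p i j acc =
      if i + j ≤ p then
        if j == 0 then build_terms_walk n p 0 (i + 1) (acc ++ [(i, j)])
        else build_terms_walk n p (i + 1) (j - 1) (acc ++ [(i, j)])
      else acc := rfl

-- B's walk spends j + 1 steps finishing the diagonal of total degree i + j.
lemma walk_diag (p : Int) (j : Nat) : ∀ (n : Nat) (i : Int) (acc : List (Int × Int)),
    0 ≤ i → i + (j : Int) ≤ p →
    build_terms_walk (n + j + 1) p i (j : Int) acc
      = build_terms_walk n p 0 (i + (j : Int) + 1)
          (acc ++ (PySem.List.pyRange i (i + (j : Int) + 1) 1).map (fun k => (k, i + (j : Int) - k))) := by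
  induction j with
  | zero =>
    intro n i acc hi hip
    simp only [Nat.cast_zero, add_zero] at *
    rw [show n + 0 + 1 = n + 1 from rfl, walk_succ]
    rw [if_pos (by omega : i + 0 ≤ p), if_pos (by decide : ((0:Int) == 0) = true)]
    rw [PySem.List.pyRange_one_singleton i]
    simp
  | succ j ih =>
    intro n i acc hi hip
    push_cast at *
    rw [show n + (j + 1) + 1 = (n + j + 1) + 1 from rfl, walk_succ]
    rw [if_pos (by omega : i + ((j : Int) + 1) ≤ p), if_neg (by simp; omega : ¬((((j : Int) + 1) == 0) = true))]
    have hj1 : (j : Int) + 1 - 1 = (j : Int) := by ring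
    rw [hj1]
    have h2 := ih n (i + 1) (acc ++ [(i, (j : Int) + 1)]) (by omega) (by omega)
    rw [h2]
    rw [PySem.List.pyRange_one_cons (by omega : i < i + ((j : Int) + 1) + 1)]
    have he1 : i + 1 + (j : Int) + 1 = i + ((j : Int) + 1) + 1 := by ring
    have he2' : (fun k : Int => (k, i + 1 + (j : Int) - k)) = (fun k : Int => (k, i + ((j : Int) + 1) - k)) := by
      funext k
      rw [show i + 1 + (j : Int) - k = i + ((j : Int) + 1) - k by ring]
    rw [he1, he2']
    simp [show i + ((j : Int) + 1) - i = (j : Int) + 1 from by ring]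

-- with fuel exceeding the number of remaining pairs, the walk from (0, t) emits
-- all diagonals t..p.
lemma walk_tail (p : Int) : ∀ (m : Nat) (t : Int) (n : Nat) (acc : List (Int × Int)),
    0 ≤ t → (p + 1 - t).toNat = m → (pvTail p t).length + 1 ≤ n →
    build_terms_walk n p 0 t acc = acc ++ pvTail p t := by
  intro m
  induction m with
  | zero =>
    intro t n acc ht hm hn
    have htail : pvTail p t = [] := by
      unfold pvTail
      rw [PySem.List.pyRange_one_eq_nil (by omega)]
      simp
    rw [htail]
    match n, hn with
    | Nat.succ n', _ =>
      simp only [build_terms_walk, if_neg (by omega : ¬(0 + t ≤ p))]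
      simp
  | succ m ih =>
    intro t n acc ht hm hn
    have htp : t ≤ p := by omega
    have hsplit : pvTail p t = pvDiag t ++ pvTail p (t + 1) := by
      unfold pvTail
      rw [PySem.List.pyRange_one_cons (by omega : t < p + 1)]
      simp
    have hdlen : (pvDiag t).length = t.toNat + 1 := by
      unfold pvDiag
      rw [List.length_map, PySem.List.length_pyRange_one]
      omega
    have hlen : (pvTail p t).length = t.toNat + 1 + (pvTail p (t + 1)).length := by
      rw [hsplit, List.length_append, hdlen]
    obtain ⟨n0, rfl⟩ : ∃ n0, n = n0 + t.toNat + 1 := ⟨n - (t.toNat + 1), by omega⟩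
    have hcast : ((t.toNat : Int)) = t := by omega
    have hA := walk_diag p t.toNat n0 0 acc (le_refl 0) (by omega)
    rw [hcast] at hA
    simp only [zero_add] at hA
    rw [hA]
    rw [ih (t + 1) n0 (acc ++ (PySem.List.pyRange 0 (t + 1) 1).map (fun k => (k, t - k)))
        (by omega) (by omega) (by omega)]
    rw [hsplit]
    unfold pvDiag
    simp

-- |terms| for p = nn ≥ 0 is the triangular number (nn+1)(nn+2)/2.
lemma tail_len_two (nn : Nat) : 2 * (pvTail (nn : Int) 0).length = (nn + 1) * (nn + 2) := by
  induction nn with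
  | zero =>
    unfold pvTail pvDiag
    decide
  | succ nn ih =>
    have hstep : pvTail ((nn : Int) + 1) 0 = pvTail (nn : Int) 0 ++ pvDiag ((nn : Int) + 1) := by
      unfold pvTail
      rw [show (nn : Int) + 1 + 1 = ((nn : Int) + 1) + 1 from rfl,
          PySem.List.pyRange_one_succ_right (by omega : (0:Int) ≤ (nn : Int) + 1)]
      simp
    have hdlen : (pvDiag ((nn : Int) + 1)).length = nn + 2 := by
      unfold pvDiag
      rw [List.length_map, PySem.List.length_pyRange_one]
      omega
    have hc : ((nn + 1 : Nat) : Int) = (nn : Int) + 1 := by push_cast; ring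
    rw [hc, hstep, List.length_append, hdlen]
    have key : (nn + 1 + 1) * (nn + 1 + 2) = (nn + 1) * (nn + 2) + 2 * (nn + 2) := by ring
    rw [key, ← ih]
    omega

lemma alt_eq (p : Int) :
    build_terms_alt p = (pvTail p 0, ((pvTail p 0).length : Int)) := by
  unfold build_terms_alt
  have hn : (pvTail p 0).length + 1 ≤ ((p + 1) * (p + 2)).toNat + 1 := by
    by_cases hp : 0 ≤ p
    · obtain ⟨nn, rfl⟩ := Int.eq_ofNat_of_zero_le hp
      have h2 := tail_len_two nn
      have hc : ((nn : Int) + 1) * ((nn : Int) + 2) = (((nn + 1) * (nn + 2) : Nat) : Int) := by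
        push_cast; ring
      rw [hc, Int.toNat_natCast]
      omega
    · have htail : pvTail p 0 = [] := by
        unfold pvTail
        rw [PySem.List.pyRange_one_eq_nil (by omega)]
        simp
      rw [htail]
      simp
  rw [walk_tail p (p + 1 - 0).toNat 0 _ [] le_rfl rfl hn]
  simp

-- ===== VERDICT (by name: the statement is the Claim_ definition above) =====
theorem build_terms_spec : Claim_equal_build_terms := by
  intro p _ _
  unfold Spec_build_terms
  rw [build_terms_eq, alt_eq]
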